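-- pv_equiv track=rewrite | github.com/fahaddd-git/adventOfCode2022 | 8/eight_v2.py | find_score_matrix
-- ===== SOURCE A (Python) =====
-- def find_score_matrix(grid):
--     """
--     scoring algorithm
--
--     m=[3,5,3,4,5]
--     scores=[0,0,0,0,0]
--     leftmost score is always 0
--
--     [0] top of stack keeps track of idx of taller trees than curr (they block view)
--     []  pop since m[1] > m[0]    5>3
--     setscore 1-0 = 1   scores=[0,1,0,0,0]
--     [1] add curr idx
--
--     [1]  m[2] not taller than m[stack[-1]]. don't pop
--     setscore 2-1 = 1 scores=[0,1,1,0,0]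
--     [1,2] add curr idx to stack
--
--     [1,2] -> [1]   m[3] taller than matrix[stack[-1]]. pop from stack.
--     [1]   m[3] not taller than matrix[stack[-1]]. don't pop.
--     setscore 3-1 = 2 scores=[0,1,1,2,0]
--     [1,3] add cur idx to stack
--
--     [1,3]->[1] m[4] taller than matrix[stack[-1]]. pop from stack
--     [1]  m[4] not taller than matrix[stack[-1]]. don't pop
--     setscore 4-1 = 3 scores=[0,1,1,2,3]
--
--     """
--
--     scores = [[0 for _ in range(len(grid))] for _ in range(len(grid[0]))]
--
--     for i in range(len(grid)):
--         stack = [0]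
--         for j in range(1, len(grid[0])):
--             while stack and grid[i][j] > grid[i][stack[-1]]:
--                 stack.pop()
--             scores[i][j] = j if not stack else j - stack[-1]
--             stack.append(j)
--     return scores
-- ===== SOURCE B (Python) =====
-- def find_score_matrix(grid):
--     rows = len(grid)
--     cols = len(grid[0])
--     scores = [[0] * rows for _ in range(cols)]
--     for i, row in enumerate(grid):
--         for j in range(1, cols):
--             h = row[j]
--             k = j - 1
--             while k >= 0 and row[k] < h:
--                 k -= 1
--             scores[i][j] = j - k if k >= 0 else j
--     return scores
-- ===== Notes on version B (the rewrite author's own statement) =====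
-- stated objective: simpler
-- what changed: Replaces the per-row monotonic stack threaded across columns by a stateless per-cell backward scan for the nearest tree of height >= the current one (and iterates rows with enumerate instead of index arithmetic).
import Mathlib
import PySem

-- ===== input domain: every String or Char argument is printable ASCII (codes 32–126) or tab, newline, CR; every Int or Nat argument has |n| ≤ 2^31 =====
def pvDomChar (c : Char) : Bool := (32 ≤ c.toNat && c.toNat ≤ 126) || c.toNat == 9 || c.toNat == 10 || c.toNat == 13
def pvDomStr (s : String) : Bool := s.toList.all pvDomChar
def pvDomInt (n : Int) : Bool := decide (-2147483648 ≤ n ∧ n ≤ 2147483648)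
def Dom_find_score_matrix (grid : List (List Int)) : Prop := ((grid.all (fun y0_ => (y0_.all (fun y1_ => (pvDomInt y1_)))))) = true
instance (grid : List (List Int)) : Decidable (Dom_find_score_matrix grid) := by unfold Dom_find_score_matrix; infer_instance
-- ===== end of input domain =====

-- B replaces A's per-row monotonic stack by a direct per-cell backward scan for the nearest
-- blocking tree (objective: simpler); same return value, same transposed score allocation.

-- ===== PORT A =====
-- row[k] (k a Python int index); all indices the algorithms form are in range under Pre_
def pvRowAt (row : List Int) (k : Int) : Int := PySem.List.pyGetD row k 0

-- scores[i][j] = v (i, j nonnegative here; List.set/modify are in-range no-ops like the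
-- in-range Python assignment; out-of-range assignments are excluded by Pre_)
def pvSet2 (m : List (List Int)) (i j : Int) (v : Int) : List (List Int) :=
  m.modify i.toNat (fun r => r.set j.toNat v)

-- `while stack and grid[i][j] > grid[i][stack[-1]]: stack.pop()`; stack head = Python stack[-1]
def pvPopWhile (row : List Int) (h : Int) : List Int → List Int
  | [] => []
  | t :: rest => if pvRowAt row t < h then pvPopWhile row h rest else t :: rest

-- one iteration of A's inner `for j` loop (state: scores matrix and stack)
def pvStepA (row : List Int) (i : Int) (st : List (List Int) × List Int) (j : Int) :
    List (List Int) × List Int :=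
  let stack := pvPopWhile row (pvRowAt row j) st.2
  (pvSet2 st.1 i j (if stack.isEmpty then j else j - stack.headD 0), j :: stack)

def find_score_matrix (grid : List (List Int)) : List (List Int) :=
  let n : Int := grid.length
  let c : Int := (PySem.List.pyGetD grid 0 []).length
  let scores0 := List.replicate c.toNat (List.replicate n.toNat (0 : Int))
  (PySem.List.pyRange 0 n).foldl
    (fun scores i =>
      -- row := grid[i] (Python re-evaluates this same pure lookup at each access)
      let row := PySem.List.pyGetD grid i []
      ((PySem.List.pyRange 1 c).foldl (pvStepA row i) (scores, ([0] : List Int))).1)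
    scores0

-- ===== PORT B =====
-- `k = j - 1; while k >= 0 and row[k] < h: k -= 1` — the same countdown loop, structurally
-- recursing on k+1 as a Nat; returns the final k (-1 when the scan ran off the left edge)
def pvScanDownNat (row : List Int) (h : Int) : Nat → Int
  | 0 => -1
  | n + 1 => if pvRowAt row n < h then pvScanDownNat row h n else n

def pvScanDown (row : List Int) (h : Int) (k : Int) : Int :=
  pvScanDownNat row h (k + 1).toNat

-- one iteration of B's inner `for j` loop (state: scores matrix only)
def pvStepB (row : List Int) (i : Int) (scores : List (List Int)) (j : Int) :
    List (List Int) :=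
  let k := pvScanDown row (pvRowAt row j) (j - 1)
  pvSet2 scores i j (if 0 ≤ k then j - k else j)

def find_score_matrix_alt (grid : List (List Int)) : List (List Int) :=
  let rows : Int := grid.length
  let cols : Int := (PySem.List.pyGetD grid 0 []).length
  let scores0 := List.replicate cols.toNat (List.replicate rows.toNat (0 : Int))
  (PySem.List.enumerate grid).foldl
    (fun scores p => (PySem.List.pyRange 1 cols).foldl (pvStepB p.2 p.1) scores)
    scores0

-- ===== PRECONDITION & SPEC =====
-- Pre_ is exactly the set of inputs on which the Python A returns (anything else raises
-- IndexError): a nonempty grid that either has at most one column, or is square with no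
-- row shorter than the first.
def Pre_find_score_matrix (grid : List (List Int)) : Prop :=
  grid ≠ [] ∧
    ((grid.headD []).length ≤ 1 ∨
      ((grid.headD []).length = grid.length ∧
        ∀ row ∈ grid, (grid.headD []).length ≤ row.length))
instance (grid : List (List Int)) : Decidable (Pre_find_score_matrix grid) := by
  unfold Pre_find_score_matrix; infer_instance

def pvWitness_find_score_matrix : List (List Int) := [[3, 5, 3], [2, 2, 2], [1, 4, 1]]

def Spec_find_score_matrix (grid : List (List Int)) (out : List (List Int)) : Prop := out = find_score_matrix_alt grid
instance (grid : List (List Int)) (out : List (List Int)) : Decidable (Spec_find_score_matrix grid out) := by unfold Spec_find_score_matrix; infer_instance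

-- ===== CLAIM (what is proved, stated in full; the proofs are below) =====
def Claim_equal_find_score_matrix : Prop := ∀ (grid : List (List Int)), Dom_find_score_matrix grid → Pre_find_score_matrix grid → Spec_find_score_matrix grid (find_score_matrix grid)

-- ===== LEMMAS AND PROOFS =====

-- the invariant A's stack maintains before processing column j:
-- all entries are indices < j, strictly decreasing from the top, and every index < j that is
-- NOT on the stack is strictly dominated by some later index still left of j.
def pvInv (row : List Int) (j : Nat) (stack : List Int) : Prop :=
  (∀ t ∈ stack, ∃ m : Nat, t = (m : Int) ∧ m < j) ∧
  stack.Pairwise (· > ·) ∧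
  (∀ k : Nat, k < j → (k : Int) ∉ stack →
    ∃ m : Nat, k < m ∧ m < j ∧ pvRowAt row (k : Int) < pvRowAt row (m : Int))

theorem pvInv_one (row : List Int) : pvInv row 1 [0] := by
  refine ⟨?_, ?_, ?_⟩
  · rintro t ht; simp at ht; exact ⟨0, by simp [ht]⟩
  · simp
  · intro k hk hmem; interval_cases k; simp at hmem

theorem pvPopWhile_eq_dropWhile (row : List Int) (h : Int) (stack : List Int) :
    pvPopWhile row h stack = stack.dropWhile (fun t => pvRowAt row t < h) := by
  induction stack with
  | nil => rfl
  | cons t rest ih =>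
    by_cases hc : pvRowAt row t < h <;> simp [pvPopWhile, hc, ih]

theorem pvScanDownNat_spec (row : List Int) (h : Int) (j : Nat) :
    (pvScanDownNat row h j = -1 ∧ ∀ k : Nat, k < j → pvRowAt row (k : Int) < h) ∨
    (∃ k : Nat, k < j ∧ pvScanDownNat row h j = (k : Int) ∧
      ¬ pvRowAt row (k : Int) < h ∧
      ∀ m : Nat, k < m → m < j → pvRowAt row (m : Int) < h) := by
  induction j with
  | zero => left; exact ⟨rfl, by omega⟩
  | succ n ih =>
    by_cases hc : pvRowAt row (n : Int) < h
    · rcases ih with ⟨h1, h2⟩ | ⟨k, hk, he, hge, hall⟩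
      · left
        refine ⟨by simp [pvScanDownNat, hc, h1], ?_⟩
        intro k hk
        rcases Nat.lt_succ_iff_lt_or_eq.mp hk with hk | hk
        · exact h2 k hk
        · simpa [hk] using hc
      · right
        refine ⟨k, by omega, by simp [pvScanDownNat, hc, he], hge, ?_⟩
        intro m h1 h2
        rcases Nat.lt_succ_iff_lt_or_eq.mp h2 with h2 | h2
        · exact hall m h1 h2
        · simpa [h2] using hc
    · right
      exact ⟨n, by omega, by simp [pvScanDownNat, hc], hc, by omega⟩

theorem pvScanDown_eq_nat (row : List Int) (h : Int) (j : Nat) :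
    pvScanDown row h ((j : Int) - 1) = pvScanDownNat row h j := by
  unfold pvScanDown
  congr 1
  omega

-- the crux: with the invariant, A's "pop then read the top" computes the same score as
-- B's backward scan for the nearest tree of height ≥ h.
theorem pvTop_eq_scan (row : List Int) (j : Nat) (h : Int) (stack : List Int)
    (hInv : pvInv row j stack) :
    (let st := pvPopWhile row h stack;
      if st.isEmpty then (j : Int) else (j : Int) - st.headD 0) =
    (let k := pvScanDown row h ((j : Int) - 1);
      if 0 ≤ k then (j : Int) - k else (j : Int)) := by
  obtain ⟨hrng, hpw, hcomp⟩ := hInv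
  rw [pvPopWhile_eq_dropWhile, pvScanDown_eq_nat]
  set p : Int → Bool := fun t => pvRowAt row t < h with hp
  rcases hst : stack.dropWhile p with _ | ⟨t, rest⟩
  · -- stack emptied: every index < j must be shorter than h
    have hall : ∀ x ∈ stack, p x = true := List.dropWhile_eq_nil_iff.mp hst
    rcases pvScanDownNat_spec row h j with ⟨h1, _⟩ | ⟨k, hk, he, hge, hmax⟩
    · simp [h1]
    · exfalso
      by_cases hmem : (k : Int) ∈ stack
      · exact hge (by simpa [hp] using hall _ hmem)
      · obtain ⟨m, hkm, hmj, hlt⟩ := hcomp k hk hmem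
        exact absurd (hmax m hkm hmj) (by omega)
  · -- top t survives: it is exactly the index B's scan stops at
    have hmemt : t ∈ stack := (List.dropWhile_sublist p).mem (hst ▸ List.mem_cons_self)
    obtain ⟨tn, htn, htnj⟩ := hrng t hmemt
    have hpt : ¬ pvRowAt row t < h := by
      have := List.head?_dropWhile_not p stack
      rw [hst] at this
      simpa [hp] using this
    rcases pvScanDownNat_spec row h j with ⟨_, h2⟩ | ⟨k, hk, he, hge, hmax⟩
    · exact absurd (h2 tn htnj) (htn ▸ hpt)
    · have hkt : k = tn := by
        by_contra hne
        rcases Nat.lt_or_ge k tn with hlt | hge2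
        · -- k < tn would make tn a closer blocker than the scan result
          exact absurd (hmax tn hlt htnj) (htn ▸ hpt)
        · -- tn < k: where would index k be?
          have hktn : tn < k := by omega
          by_cases hmem : (k : Int) ∈ stack
          · -- on the stack: above t it was dropped (height < h), below t it is < t
            have hsplit : (k : Int) ∈ stack.takeWhile p ++ stack.dropWhile p := by
              rw [List.takeWhile_append_dropWhile]; exact hmem
            rcases List.mem_append.mp hsplit with htake | hdrop
            · exact hge (by simpa [hp] using List.mem_takeWhile_imp htake)
            · rw [hst] at hdrop
              rcases List.mem_cons.mp hdrop with heq | hrest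
              · omega
              · have hpw' : (t :: rest).Pairwise (· > ·) :=
                  List.Pairwise.sublist (hst ▸ List.dropWhile_sublist p) hpw
                have := (List.pairwise_cons.mp hpw').1 _ hrest
                omega
          · obtain ⟨m, hkm, hmj, hlt⟩ := hcomp k hk hmem
            exact absurd (hmax m hkm hmj) (by omega)
      subst hkt
      simp only [he, List.isEmpty_cons, List.headD_cons]
      rw [htn]
      simp

-- pushing j after popping preserves the invariant for column j+1
theorem pvInv_step (row : List Int) (j : Nat) (stack : List Int)
    (hInv : pvInv row j stack) :
    pvInv row (j + 1) ((j : Int) :: pvPopWhile row (pvRowAt row (j : Int)) stack) := by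
  obtain ⟨hrng, hpw, hcomp⟩ := hInv
  rw [pvPopWhile_eq_dropWhile]
  set p : Int → Bool := fun t => pvRowAt row t < pvRowAt row (j : Int) with hp
  have hsub := List.dropWhile_sublist (l := stack) p
  refine ⟨?_, ?_, ?_⟩
  · rintro t ht
    rcases List.mem_cons.mp ht with rfl | hmem
    · exact ⟨j, rfl, by omega⟩
    · obtain ⟨m, hm, hmj⟩ := hrng t (hsub.mem hmem)
      exact ⟨m, hm, by omega⟩
  · refine List.pairwise_cons.mpr ⟨?_, List.Pairwise.sublist hsub hpw⟩
    intro t hmem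
    obtain ⟨m, hm, hmj⟩ := hrng t (hsub.mem hmem)
    omega
  · intro k hk hmem
    have hkj : k ≠ j := by
      rintro rfl; exact hmem (List.mem_cons_self)
    have hkj' : k < j := by omega
    have hmem' : (k : Int) ∉ stack.dropWhile p := fun hc => hmem (List.mem_cons_of_mem _ hc)
    by_cases hmemS : (k : Int) ∈ stack
    · -- k was just popped: row[k] < row[j]
      have htake : (k : Int) ∈ stack.takeWhile p := by
        have := List.takeWhile_append_dropWhile (p := p) (l := stack)
        rcases List.mem_append.mp (this ▸ hmemS) with h1 | h1
        · exact h1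
        · exact absurd h1 hmem'
      exact ⟨j, hkj', by omega, by simpa [hp] using List.mem_takeWhile_imp htake⟩
    · obtain ⟨m, hkm, hmj, hlt⟩ := hcomp k hkj' hmemS
      exact ⟨m, hkm, by omega, hlt⟩

-- the inner `for j` loops agree, threading the invariant down the remaining range
theorem pvInner_eq (row : List Int) (i : Int) (c : Int) :
    ∀ (d : Nat) (j : Nat) (scores : List (List Int)) (stack : List Int),
      (c - (j : Int)).toNat = d → 1 ≤ j → pvInv row j stack →
      ((PySem.List.pyRange (j : Int) c).foldl (pvStepA row i) (scores, stack)).1 =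
        (PySem.List.pyRange (j : Int) c).foldl (pvStepB row i) scores := by
  intro d
  induction d with
  | zero =>
    intro j scores stack hd _ _
    rw [PySem.List.pyRange_one_eq_nil (by omega)]
    simp
  | succ d ih =>
    intro j scores stack hd hj hInv
    have hjc : (j : Int) < c := by omega
    rw [PySem.List.pyRange_one_cons hjc]
    simp only [List.foldl_cons]
    have hval := pvTop_eq_scan row j (pvRowAt row (j : Int)) stack hInv
    simp only [pvStepA, pvStepB]
    rw [hval]
    have : ((j : Int) + 1) = ((j + 1 : Nat) : Int) := by push_cast; ring
    rw [this]
    exact ih (j + 1) _ _ (by omega) (by omega) (pvInv_step row j stack hInv)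

theorem pv_ports_eq (grid : List (List Int)) :
    find_score_matrix grid = find_score_matrix_alt grid := by
  unfold find_score_matrix find_score_matrix_alt
  rw [PySem.List.enumerate_eq_map_pyRange grid [], List.foldl_map]
  simp only [PySem.List.len_eq]
  apply PySem.List.foldl_congr_mem
  intro scores i _
  have h1 : (1 : Int) = ((1 : Nat) : Int) := rfl
  rw [h1]
  exact pvInner_eq _ i _ _ 1 scores [0] rfl le_rfl (pvInv_one _)

-- ===== VERDICT (by name: the statement is the Claim_ definition above) =====
theorem find_score_matrix_spec : Claim_equal_find_score_matrix := by
  intro grid _ _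
  unfold Spec_find_score_matrix
  exact pv_ports_eq grid
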